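-- pv_equiv track=rewrite | github.com/Buscedv/Ask | ask.py | is_db_column_in_past_line
-- ===== SOURCE A (Python) =====
-- def is_db_column_in_past_line(tokens):
-- 	for token in tokens[::-1]:
-- 		token_type = token[0]
-- 		token_val = token[1]
--
-- 		if token_type == 'FORMAT' and token_val == '\n':
-- 			break
--
-- 		if token_type == 'DB_ACTION' and token_val == 'col' or token_type == 'DB_CLASS':
-- 			return True
--
-- 	return False
-- ===== SOURCE B (Python) =====
-- def is_db_column_in_past_line(tokens):
-- 	# boundary pass: index just after the last FORMAT '\n' token (0 if none)
-- 	start = 0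
-- 	i = 0
-- 	for token in tokens:
-- 		i += 1
-- 		if token[0] == 'FORMAT' and token[1] == '\n':
-- 			start = i
-- 	# forward scan over the last logical line only
-- 	for token in tokens[start:]:
-- 		if token[0] == 'DB_ACTION' and token[1] == 'col' or token[0] == 'DB_CLASS':
-- 			return True
-- 	return False
-- ===== Notes on version B (the rewrite author's own statement) =====
-- stated objective: alternative
-- what changed: Replaces the single reverse early-exit loop with a boundary-index pass (position after the last FORMAT newline) followed by a forward scan over only the last line.
import Mathlib
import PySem

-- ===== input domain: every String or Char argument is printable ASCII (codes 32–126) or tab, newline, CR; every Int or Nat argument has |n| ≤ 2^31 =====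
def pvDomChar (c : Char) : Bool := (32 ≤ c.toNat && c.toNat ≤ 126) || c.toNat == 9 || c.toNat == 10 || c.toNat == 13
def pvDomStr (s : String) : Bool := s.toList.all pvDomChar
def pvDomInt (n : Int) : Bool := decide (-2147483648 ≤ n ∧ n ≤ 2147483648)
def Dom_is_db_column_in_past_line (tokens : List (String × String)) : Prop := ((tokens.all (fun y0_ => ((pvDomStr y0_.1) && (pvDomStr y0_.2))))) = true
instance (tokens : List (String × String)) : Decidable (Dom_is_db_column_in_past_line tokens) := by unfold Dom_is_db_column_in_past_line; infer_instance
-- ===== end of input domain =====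

-- B replaces A's reverse early-exit loop by a boundary-index pass plus a forward scan (alternative decomposition, same cost).

-- ===== PORT A =====
-- A's reverse loop: break on FORMAT '\n', return True on a DB hit, else fall through.
def pvALoop : List (String × String) → Bool
  | [] => false
  | t :: rest =>
    if t.1 == "FORMAT" && t.2 == "\n" then false
    else if (t.1 == "DB_ACTION" && t.2 == "col") || t.1 == "DB_CLASS" then true
    else pvALoop rest

-- tokens[::-1] is exactly List.reverse
def is_db_column_in_past_line (tokens : List (String × String)) : Bool :=
  pvALoop tokens.reverse

-- ===== PORT B =====
-- first pass of Source B: running counter i, start = i after each FORMAT '\n'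
def pvLastLineStart : List (String × String) → Nat → Nat → Nat
  | [], _, start => start
  | t :: rest, i, start =>
    pvLastLineStart rest (i + 1) (if t.1 == "FORMAT" && t.2 == "\n" then i + 1 else start)

-- second pass of Source B: forward scan returning on the first DB hit
def pvForward : List (String × String) → Bool
  | [] => false
  | t :: rest =>
    if (t.1 == "DB_ACTION" && t.2 == "col") || t.1 == "DB_CLASS" then true
    else pvForward rest

def is_db_column_in_past_line_alt (tokens : List (String × String)) : Bool :=
  pvForward (tokens.drop (pvLastLineStart tokens 0 0))

-- ===== PRECONDITION & SPEC =====
def Spec_is_db_column_in_past_line (tokens : List (String × String)) (out : Bool) : Prop := out = is_db_column_in_past_line_alt tokens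
instance (tokens : List (String × String)) (out : Bool) : Decidable (Spec_is_db_column_in_past_line tokens out) := by unfold Spec_is_db_column_in_past_line; infer_instance

-- ===== CLAIM (what is proved, stated in full; the proofs are below) =====
def Claim_equal_is_db_column_in_past_line : Prop := ∀ (tokens : List (String × String)), Dom_is_db_column_in_past_line tokens → Spec_is_db_column_in_past_line tokens (is_db_column_in_past_line tokens)

-- ===== LEMMAS AND PROOFS =====

theorem pvLastLineStart_append_single (l : List (String × String)) (t : String × String)
    (i s : Nat) :
    pvLastLineStart (l ++ [t]) i s
      = if t.1 == "FORMAT" && t.2 == "\n" then i + l.length + 1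
        else pvLastLineStart l i s := by
  induction l generalizing i s with
  | nil => simp [pvLastLineStart]
  | cons h rest ih =>
    simp only [List.cons_append, pvLastLineStart, ih, List.length_cons]
    split <;> ring_nf

theorem pvLastLineStart_le (l : List (String × String)) (i s : Nat) (hs : s ≤ i) :
    pvLastLineStart l i s ≤ i + l.length := by
  induction l generalizing i s with
  | nil => simpa [pvLastLineStart] using hs
  | cons h rest ih =>
    simp only [pvLastLineStart, List.length_cons]
    have : (if h.1 == "FORMAT" && h.2 == "\n" then i + 1 else s) ≤ i + 1 := by
      split <;> omega
    have := ih (i + 1) _ this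
    omega

theorem pvForward_append (xs ys : List (String × String)) :
    pvForward (xs ++ ys) = (pvForward xs || pvForward ys) := by
  induction xs with
  | nil => simp [pvForward]
  | cons t rest ih =>
    simp only [List.cons_append, pvForward, ih]
    split <;> simp

theorem pvMain (tokens : List (String × String)) :
    pvALoop tokens.reverse = pvForward (tokens.drop (pvLastLineStart tokens 0 0)) := by
  induction tokens using List.reverseRecOn with
  | nil => simp [pvALoop, pvForward, pvLastLineStart]
  | append_singleton l t ih =>
    rw [List.reverse_append, List.reverse_singleton, List.singleton_append,
      pvLastLineStart_append_single]
    by_cases hnl : (t.1 == "FORMAT" && t.2 == "\n") = true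
    · rw [if_pos hnl]
      simp [pvALoop, hnl, pvForward]
    · have hle : pvLastLineStart l 0 0 ≤ l.length := by
        simpa using pvLastLineStart_le l 0 0 (le_refl 0)
      rw [if_neg hnl, List.drop_append_of_le_length hle, pvForward_append]
      simp only [pvALoop, hnl, ih]
      by_cases hhit : ((t.1 == "DB_ACTION" && t.2 == "col") || t.1 == "DB_CLASS") = true
      · simp [hhit, pvForward]
      · simp [hhit, pvForward]

-- ===== VERDICT (by name: the statement is the Claim_ definition above) =====
theorem is_db_column_in_past_line_spec : Claim_equal_is_db_column_in_past_line := by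
  intro tokens _
  unfold Spec_is_db_column_in_past_line is_db_column_in_past_line is_db_column_in_past_line_alt
  exact pvMain tokens
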